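-- pv_equiv track=rewrite | github.com/ochavarria/Proyectos-TEC | Progras/Python/Introduccion/Ejercicios Basicos.py | ordenado_aux
-- ===== SOURCE A (Python) =====
-- def ordenado_aux(num):
--     if(num==0):
--         return True
--     else:
--         if((num//10)%10 <= num%10):
--             return ordenado_aux(num//10)
--         else:
--             return False
-- ===== SOURCE B (Python) =====
-- def ordenado_aux(num):
--     digits = []
--     while num != 0:
--         digits.append(num % 10)
--         num //= 10
--     return all(b <= a for a, b in zip(digits, digits[1:]))
-- ===== Notes on version B (the rewrite author's own statement) =====
-- stated objective: alternative
-- what changed: Replaces the boolean recursion by an iterative digit-extraction loop that builds the list of digits and then checks adjacent-pair order with zip/all.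
-- outside the precondition, e.g. on ordenado_aux(-2): A returns False, B does not finish within the time limit
import Mathlib
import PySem

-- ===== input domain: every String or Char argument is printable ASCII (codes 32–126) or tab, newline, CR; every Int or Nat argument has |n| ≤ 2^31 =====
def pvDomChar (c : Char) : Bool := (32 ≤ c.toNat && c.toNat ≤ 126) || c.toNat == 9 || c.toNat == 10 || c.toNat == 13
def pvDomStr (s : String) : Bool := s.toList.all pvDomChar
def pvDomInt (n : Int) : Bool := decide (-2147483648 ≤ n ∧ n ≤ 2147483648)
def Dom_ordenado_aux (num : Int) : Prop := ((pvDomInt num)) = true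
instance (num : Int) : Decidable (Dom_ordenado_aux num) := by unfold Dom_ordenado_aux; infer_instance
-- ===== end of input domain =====

-- B replaces A's boolean recursion by an iterative digit-extraction loop plus a zip/all
-- adjacent-pair check (objective: alternative decomposition, same cost).


-- ===== PORT A =====
-- A's recursion does not terminate for negative num (Python hits RecursionError),
-- so the port carries a fuel parameter; num.natAbs + 1 fuel is exact for every num ≥ 0.
def ordenadoAuxGo : Nat → Int → Bool
  | 0, _ => false
  | fuel + 1, num =>
    if num == 0 then true
    else
      if PySem.Int.mod (PySem.Int.floordiv num 10) 10 ≤ PySem.Int.mod num 10 then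
        ordenadoAuxGo fuel (PySem.Int.floordiv num 10)
      else false

def ordenado_aux (num : Int) : Bool := ordenadoAuxGo (num.natAbs + 1) num

-- ===== PORT B =====
-- the while loop building `digits` (least-significant digit first); same fuel device
def pvDigitsGo : Nat → Int → List Int
  | 0, _ => []
  | fuel + 1, num =>
    if num == 0 then []
    else PySem.Int.mod num 10 :: pvDigitsGo fuel (PySem.Int.floordiv num 10)

def ordenado_aux_alt (num : Int) : Bool :=
  let digits := pvDigitsGo (num.natAbs + 1) num
  (digits.zip digits.tail).all (fun p => decide (p.2 ≤ p.1))

-- ===== PRECONDITION & SPEC =====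
-- Pre_ excludes negative num, outside the function's natural domain: there A either hits
-- RecursionError (e.g. -1) or returns an accidental value of its floored-division digits
-- (e.g. -2 -> False), while B's digit loop never terminates.
def Pre_ordenado_aux (num : Int) : Prop := 0 ≤ num
instance (num : Int) : Decidable (Pre_ordenado_aux num) := by unfold Pre_ordenado_aux; infer_instance
def pvWitness_ordenado_aux : Int := (123)
def Spec_ordenado_aux (num : Int) (out : Bool) : Prop := out = ordenado_aux_alt num
instance (num : Int) (out : Bool) : Decidable (Spec_ordenado_aux num out) := by unfold Spec_ordenado_aux; infer_instance

-- ===== CLAIM (what is proved, stated in full; the proofs are below) =====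
def Claim_equal_ordenado_aux : Prop := ∀ (num : Int), Dom_ordenado_aux num → Pre_ordenado_aux num → Spec_ordenado_aux num (ordenado_aux num)

-- ===== LEMMAS AND PROOFS =====

-- the adjacent-pair check, unfolded one digit
theorem pvCheck_cons (d : Int) (l : List Int) :
    (((d :: l).zip (d :: l).tail).all (fun p => decide (p.2 ≤ p.1))) =
      (match l with
       | [] => true
       | e :: _ => decide (e ≤ d) && ((l.zip l.tail).all (fun p => decide (p.2 ≤ p.1)))) := by
  cases l <;> simp [List.zip]

theorem pvFloordiv_mod_facts (num : Int) (h0 : 0 < num) :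
    0 ≤ PySem.Int.floordiv num 10 ∧ (PySem.Int.floordiv num 10).natAbs < num.natAbs ∧
      0 ≤ PySem.Int.mod num 10 := by
  rw [PySem.Int.floordiv_eq_ediv_of_pos (by omega), PySem.Int.mod_eq_emod_of_pos (by omega)]
  refine ⟨by omega, by omega, by omega⟩

theorem ordenadoAuxGo_succ (fuel : Nat) (num : Int) (h : num ≠ 0) :
    ordenadoAuxGo (fuel + 1) num =
      (if PySem.Int.mod (PySem.Int.floordiv num 10) 10 ≤ PySem.Int.mod num 10 then
        ordenadoAuxGo fuel (PySem.Int.floordiv num 10)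
      else false) := by
  simp only [ordenadoAuxGo]
  rw [if_neg (by simpa using h)]

theorem pvDigitsGo_head (fuel : Nat) (num : Int) (h : num ≠ 0) :
    pvDigitsGo (fuel + 1) num = PySem.Int.mod num 10 :: pvDigitsGo fuel (PySem.Int.floordiv num 10) := by
  simp [pvDigitsGo, h]

theorem pvMain (fuel : Nat) : ∀ (num : Int), 0 ≤ num → num.natAbs < fuel →
    ordenadoAuxGo fuel num =
      ((pvDigitsGo fuel num).zip (pvDigitsGo fuel num).tail).all (fun p => decide (p.2 ≤ p.1)) := by
  induction fuel with
  | zero => intro num _ h; omega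
  | succ f ih =>
    intro num hnn hlt
    by_cases h0 : num = 0
    · simp [ordenadoAuxGo, pvDigitsGo, h0]
    · have hpos : 0 < num := by omega
      obtain ⟨hq0, hqlt, hm0⟩ := pvFloordiv_mod_facts num hpos
      obtain ⟨g, rfl⟩ : ∃ g, f = g + 1 := ⟨f - 1, by omega⟩
      rw [ordenadoAuxGo_succ _ _ h0, pvDigitsGo_head _ _ h0, pvCheck_cons]
      by_cases hq : PySem.Int.floordiv num 10 = 0
      · have hcond : PySem.Int.mod (PySem.Int.floordiv num 10) 10 ≤ PySem.Int.mod num 10 := by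
          rw [hq]; simpa [PySem.Int.mod] using hm0
        rw [if_pos hcond, hq]
        have hnil : pvDigitsGo (g + 1) (0 : Int) = [] := by simp [pvDigitsGo]
        rw [hnil]
        simp [ordenadoAuxGo]
      · rw [pvDigitsGo_head g _ hq]
        by_cases hcond : PySem.Int.mod (PySem.Int.floordiv num 10) 10 ≤ PySem.Int.mod num 10
        · rw [if_pos hcond, ih _ hq0 (by omega), pvDigitsGo_head g _ hq]
          simp only [hcond, decide_true, Bool.true_and]
        · rw [if_neg hcond]
          simp only [hcond, decide_false, Bool.false_and]

-- ===== VERDICT (by name: the statement is the Claim_ definition above) =====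
theorem ordenado_aux_spec : Claim_equal_ordenado_aux := by
  intro num _ hpre
  unfold Spec_ordenado_aux ordenado_aux ordenado_aux_alt
  exact pvMain (num.natAbs + 1) num hpre (by omega)
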